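-- pv_equiv track=rewrite | github.com/hmnhGeek/Data-Structures-Algorithms | Python/Practice Set 1/Heap/Minimum Sum.py | get_min_sum
-- ===== SOURCE A (Python) =====
-- class MinHeap:
--     def __init__(self):
--         self.heap = []
--
--     def is_empty(self):
--         return len(self.heap) == 0
--
--     def get_lci(self, pi):
--         lci = 2*pi + 1
--         return lci if lci in range(len(self.heap)) else None
--
--     def get_rci(self, pi):
--         rci = 2*pi + 2
--         return rci if rci in range(len(self.heap)) else None
--
--     def get_pi(self, ci):
--         if ci == 0:
--             return
--         pi = int((ci - 1)/2)
--         return pi if pi in range(len(self.heap)) else None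
--
--     def get_min_child_index(self, lci, rci):
--         if lci is None and rci is None:
--             return
--         if lci is None:
--             return rci
--         if rci is None:
--             return lci
--         min_child_index = lci
--         if self.heap[rci] < self.heap[min_child_index]:
--             min_child_index = rci
--         return min_child_index
--
--     def min_heapify_up(self, start_index):
--         if start_index == 0:
--             return
--         pi = self.get_pi(start_index)
--         lci, rci = self.get_lci(pi), self.get_rci(pi)
--         min_child_index = self.get_min_child_index(lci, rci)
--         if min_child_index is not None:
--             if self.heap[pi] > self.heap[min_child_index]:
--                 self.heap[pi], self.heap[min_child_index] = self.heap[min_child_index], self.heap[pi]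
--             self.min_heapify_up(pi)
--
--     def min_heapify_down(self, pi):
--         lci, rci = self.get_lci(pi), self.get_rci(pi)
--         min_child_index = self.get_min_child_index(lci, rci)
--         if min_child_index is not None:
--             if self.heap[pi] > self.heap[min_child_index]:
--                 self.heap[pi], self.heap[min_child_index] = self.heap[min_child_index], self.heap[pi]
--             self.min_heapify_down(min_child_index)
--
--     def insert(self, x):
--         self.heap.append(x)
--         self.min_heapify_up(len(self.heap) - 1)
--
--     def pop(self):
--         if self.is_empty():
--             return
--         item = self.heap[0]
--         self.heap[0], self.heap[-1] = self.heap[-1], self.heap[0]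
--         del self.heap[-1]
--         self.min_heapify_down(0)
--         return item
--
-- def get_min_sum(arr):
--     # push all the elements from array into the min heap in O(n * log(n)) time and O(n) space.
--     min_heap = MinHeap()
--     for i in arr:
--         min_heap.insert(i)
--
--     # initialize two numbers with 0 values.
--     n1, n2 = 0, 0
--
--     # while the min heap is not empty. This will run for n times.
--     while not min_heap.is_empty():
--         # get the first element in x.
--         x = min_heap.pop()
--         # update n1.
--         n1 = (n1 * 10 + x)
--
--         # if heap is still not empty
--         if not min_heap.is_empty():
--             # get the second element in y and update n2.
--             y = min_heap.pop()
--             n2 = (n2 * 10 + y)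
--
--     # return the final sum.
--     return n1 + n2
-- ===== SOURCE B (Python) =====
-- def get_min_sum(arr):
--     # One pass over the sorted list, splitting digits by index parity.
--     n1, n2 = 0, 0
--     for i, v in enumerate(sorted(arr)):
--         if i % 2 == 0:
--             n1 = n1 * 10 + v
--         else:
--             n2 = n2 * 10 + v
--     return n1 + n2
-- ===== Notes on version B (the rewrite author's own statement) =====
-- stated objective: simpler
-- what changed: Replaces the hand-written MinHeap class (insert/sift-up, pop/sift-down, pair-wise pop loop) with a single pass over sorted(arr) that assigns each element to n1 or n2 by index parity.
import Mathlib
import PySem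

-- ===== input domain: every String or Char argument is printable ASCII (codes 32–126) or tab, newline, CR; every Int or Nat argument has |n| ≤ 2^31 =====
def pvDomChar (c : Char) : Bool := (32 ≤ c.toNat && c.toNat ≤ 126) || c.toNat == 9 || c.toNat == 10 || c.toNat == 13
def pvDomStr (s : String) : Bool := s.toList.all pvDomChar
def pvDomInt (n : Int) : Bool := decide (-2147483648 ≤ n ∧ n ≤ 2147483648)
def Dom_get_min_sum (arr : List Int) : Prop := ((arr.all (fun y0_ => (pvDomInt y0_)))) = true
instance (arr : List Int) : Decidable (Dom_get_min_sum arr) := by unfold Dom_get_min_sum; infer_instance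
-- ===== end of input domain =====

-- B replaces A's hand-written MinHeap (insert/sift-up, pop/sift-down, pairwise pop loop)
-- with a single parity-indexed pass over the sorted list; objective: simpler.

-- ===== PORT A =====
-- A's MinHeap methods become state-passing functions on List Int (self.heap).
-- In-range list reads heap[i] are ported as getD i 0 (always in range when A runs them).

-- heap[a], heap[b] = heap[b], heap[a]
def pvSwap (l : List Int) (a b : Nat) : List Int :=
  (l.set a (l.getD b 0)).set b (l.getD a 0)


def pvGetLci (l : List Int) (pi : Nat) : Option Nat :=
  if 2 * pi + 1 < l.length then some (2 * pi + 1) else none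

def pvGetRci (l : List Int) (pi : Nat) : Option Nat :=
  if 2 * pi + 2 < l.length then some (2 * pi + 2) else none

-- int((ci-1)/2) on a nonnegative index = Nat division
def pvGetPi (l : List Int) (ci : Nat) : Option Nat :=
  if ci = 0 then none
  else if (ci - 1) / 2 < l.length then some ((ci - 1) / 2) else none

def pvMinChild (l : List Int) (lci rci : Option Nat) : Option Nat :=
  match lci, rci with
  | none, none => none
  | none, some r => some r
  | some lc, none => some lc
  | some lc, some r => some (if l.getD r 0 < l.getD lc 0 then r else lc)

-- the recursions of min_heapify_up/min_heapify_down/the pop loop are bounded by the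
-- index/length; they are ported with an explicit fuel argument (a totality guard only,
-- always called with enough fuel)
def pvHeapifyUp : Nat → List Int → Nat → List Int
  | 0, l, _ => l
  | fuel + 1, l, si =>
    if si = 0 then l
    else
      match pvGetPi l si with
      | none => l
      | some pi =>
        match pvMinChild l (pvGetLci l pi) (pvGetRci l pi) with
        | none => l
        | some mci =>
          pvHeapifyUp fuel (if l.getD pi 0 > l.getD mci 0 then pvSwap l pi mci else l) pi

def pvHeapifyDown : Nat → List Int → Nat → List Int
  | 0, l, _ => l
  | fuel + 1, l, pi =>
    match pvMinChild l (pvGetLci l pi) (pvGetRci l pi) with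
    | none => l
    | some mci =>
      pvHeapifyDown fuel (if l.getD pi 0 > l.getD mci 0 then pvSwap l pi mci else l) mci

def pvInsert (l : List Int) (x : Int) : List Int :=
  pvHeapifyUp (l ++ [x]).length (l ++ [x]) ((l ++ [x]).length - 1)

def pvPop (l : List Int) : Option (Int × List Int) :=
  if l.isEmpty then none
  else
    some (l.getD 0 0,
      pvHeapifyDown ((pvSwap l 0 (l.length - 1)).dropLast).length
        ((pvSwap l 0 (l.length - 1)).dropLast) 0)

-- the 'while not min_heap.is_empty()' loop of get_min_sum
def pvLoop : Nat → List Int → Int → Int → Int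
  | 0, _, n1, n2 => n1 + n2
  | fuel + 1, l, n1, n2 =>
    match pvPop l with
    | none => n1 + n2
    | some (x, l1) =>
      match pvPop l1 with
      | none => (n1 * 10 + x) + n2
      | some (y, l2) => pvLoop fuel l2 (n1 * 10 + x) (n2 * 10 + y)

def get_min_sum (arr : List Int) : Int :=
  pvLoop (arr.foldl pvInsert []).length (arr.foldl pvInsert []) 0 0

-- ===== PORT B =====
def get_min_sum_alt (arr : List Int) : Int :=
  let p := (PySem.List.enumerate (PySem.List.sorted arr (fun x => x)) 0).foldl
    (fun (acc : Int × Int) iv =>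
      if PySem.Int.mod iv.1 2 = 0 then (acc.1 * 10 + iv.2, acc.2)
      else (acc.1, acc.2 * 10 + iv.2)) (0, 0)
  p.1 + p.2

-- ===== PRECONDITION & SPEC =====
def Spec_get_min_sum (arr : List Int) (out : Int) : Prop := out = get_min_sum_alt arr
instance (arr : List Int) (out : Int) : Decidable (Spec_get_min_sum arr out) := by unfold Spec_get_min_sum; infer_instance

-- ===== CLAIM (what is proved, stated in full; the proofs are below) =====
def Claim_equal_get_min_sum : Prop := ∀ (arr : List Int), Dom_get_min_sum arr → Spec_get_min_sum arr (get_min_sum arr)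

-- ===== LEMMAS AND PROOFS =====

-- heap order invariant: every non-root entry is ≥ its parent
def IsHeap (l : List Int) : Prop :=
  ∀ k, 0 < k → k < l.length → l.getD ((k - 1) / 2) 0 ≤ l.getD k 0

-- sift-up invariant at hole j
def UpInv (l : List Int) (j : Nat) : Prop :=
  (∀ k, 0 < k → k < l.length → k ≠ j → l.getD ((k - 1) / 2) 0 ≤ l.getD k 0) ∧
  (0 < j → ∀ c, c < l.length → (c - 1) / 2 = j → l.getD ((j - 1) / 2) 0 ≤ l.getD c 0)

-- sift-down invariant at hole j
def DownInv (l : List Int) (j : Nat) : Prop :=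
  (∀ k, 0 < k → k < l.length → (k - 1) / 2 ≠ j → l.getD ((k - 1) / 2) 0 ≤ l.getD k 0) ∧
  (0 < j → ∀ c, c < l.length → (c - 1) / 2 = j → l.getD ((j - 1) / 2) 0 ≤ l.getD c 0)

@[simp] theorem pvSwap_length (l : List Int) (a b : Nat) : (pvSwap l a b).length = l.length := by
  simp [pvSwap]

theorem pvHeapifyDown_length (fuel : Nat) : ∀ (l : List Int) (pi : Nat),
    (pvHeapifyDown fuel l pi).length = l.length := by
  induction fuel with
  | zero => intro l pi; rfl
  | succ n ih =>
    intro l pi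
    simp only [pvHeapifyDown]
    split
    · rfl
    · rw [ih]
      split <;> simp

theorem getD_pvSwap (l : List Int) (a b k : Nat) (ha : a < l.length) (hb : b < l.length) :
    (pvSwap l a b).getD k 0 =
      if k = b then l.getD a 0 else if k = a then l.getD b 0 else l.getD k 0 := by
  have hd : ∀ (m : List Int) (i : Nat) (v : Int) (j : Nat),
      (m.set i v).getD j 0 = if i = j ∧ i < m.length then v else m.getD j 0 := by
    intro m i v j
    by_cases h1 : i = j
    · subst h1
      by_cases h2 : i < m.length
      · simp [List.getD_eq_getElem?_getD, List.getElem?_set, h2]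
      · simp [List.getD_eq_getElem?_getD, List.getElem?_set, h2,
          List.getElem?_eq_none (Nat.le_of_not_lt h2)]
    · simp [List.getD_eq_getElem?_getD, List.getElem?_set, h1]
  rw [pvSwap, hd, hd]
  simp only [List.length_set]
  split_ifs <;> first | rfl | omega

theorem pvSwap_perm (l : List Int) (a b : Nat) (ha : a < l.length) (hb : b < l.length) :
    (pvSwap l a b).Perm l := by
  rw [List.perm_iff_count]
  intro c
  have hga : l.getD a 0 = l[a] := by simp [List.getD_eq_getElem?_getD, List.getElem?_eq_getElem ha]
  have hgb : l.getD b 0 = l[b] := by simp [List.getD_eq_getElem?_getD, List.getElem?_eq_getElem hb]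
  have hb' : b < (l.set a (l.getD b 0)).length := by simpa using hb
  have hmem1 : l[a] = c → 1 ≤ l.count c := by
    intro h; exact List.count_pos_iff.mpr (h ▸ l.getElem_mem ha)
  have hmem2 : l[b] = c → 1 ≤ l.count c := by
    intro h; exact List.count_pos_iff.mpr (h ▸ l.getElem_mem hb)
  rw [pvSwap, List.count_set hb', List.count_set ha, List.getElem_set]
  by_cases h1 : l[a] = c <;> by_cases h2 : l[b] = c <;> by_cases hab : a = b <;>
    simp_all <;> omega

theorem getD_append_lt (l : List Int) (x : Int) (k : Nat) (h : k < l.length) :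
    (l ++ [x]).getD k 0 = l.getD k 0 := by
  simp [List.getD_eq_getElem?_getD, List.getElem?_append_left h]

theorem getD_dropLast (l : List Int) (k : Nat) (h : k < l.length - 1) :
    l.dropLast.getD k 0 = l.getD k 0 := by
  have h2 : k < l.length := by omega
  simp [List.getD_eq_getElem?_getD, List.getElem?_dropLast, h, List.getElem?_eq_getElem h2]

theorem minChild_none (l : List Int) (pi : Nat)
    (h : pvMinChild l (pvGetLci l pi) (pvGetRci l pi) = none) :
    l.length ≤ 2 * pi + 1 := by
  unfold pvMinChild pvGetLci pvGetRci at h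
  split_ifs at h <;> simp_all <;> omega

theorem minChild_spec (l : List Int) (pi m : Nat)
    (h : pvMinChild l (pvGetLci l pi) (pvGetRci l pi) = some m) :
    (m = 2 * pi + 1 ∨ m = 2 * pi + 2) ∧ m < l.length ∧
      (∀ c, (c = 2 * pi + 1 ∨ c = 2 * pi + 2) → c < l.length → l.getD m 0 ≤ l.getD c 0) := by
  unfold pvGetLci pvGetRci at h
  split_ifs at h with h1 h2 h3 <;> simp only [pvMinChild] at h
  · split at h <;> next hc =>
      first
      | · injection h with h; subst h
          refine ⟨Or.inr rfl, h2, ?_⟩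
          intro c hc' hcl
          rcases hc' with rfl | rfl
          · exact le_of_lt hc
          · exact le_refl _
      | · injection h with h; subst h
          refine ⟨Or.inl rfl, h1, ?_⟩
          intro c hc' hcl
          rcases hc' with rfl | rfl
          · exact le_refl _
          · exact not_lt.mp hc
  · injection h with h; subst h
    refine ⟨Or.inl rfl, h1, ?_⟩
    intro c hc' hcl
    rcases hc' with rfl | rfl
    · exact le_refl _
    · exact absurd hcl h2
  · injection h with h; subst h
    refine ⟨Or.inr rfl, h3, ?_⟩
    intro c hc' hcl
    rcases hc' with rfl | rfl
    · exact absurd hcl h1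
    · exact le_refl _
  · exact absurd h (by simp)

theorem up_correct (fuel : Nat) : ∀ (si : Nat) (l : List Int), si < fuel → si < l.length →
    UpInv l si → IsHeap (pvHeapifyUp fuel l si) ∧ (pvHeapifyUp fuel l si).Perm l := by
  induction fuel with
  | zero => intro si l hf _ _; exact absurd hf (Nat.not_lt_zero si)
  | succ n IH =>
  intro si l hf hlen hinv
  simp only [pvHeapifyUp]
  by_cases hsi : si = 0
  · rw [if_pos hsi]
    subst hsi
    refine ⟨?_, List.Perm.refl l⟩
    intro k hk hkl
    exact hinv.1 k hk hkl (by omega)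
  · rw [if_neg hsi]
    split
    · next heq =>
      exfalso
      unfold pvGetPi at heq
      split_ifs at heq <;> simp_all <;> omega
    · next pi heq =>
      have hpi : pi = (si - 1) / 2 := by
        unfold pvGetPi at heq; split_ifs at heq <;> simp_all
      have hpil : pi < l.length := by omega
      have hchild : si = 2 * pi + 1 ∨ si = 2 * pi + 2 := by omega
      have hpilt : pi < si := by omega
      split
      · next heq2 =>
        exfalso
        have := minChild_none l pi heq2
        omega
      · next mci heq2 =>
        obtain ⟨hmc, hmcl, hmin⟩ := minChild_spec l pi mci heq2
        split_ifs with hswap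
        · -- a swap happens; the swapped child must be si itself
          have hms : mci = si := by
            by_contra hne
            have h1 := hinv.1 mci (by omega) hmcl hne
            rw [show (mci - 1) / 2 = pi from by omega] at h1
            omega
          rw [hms] at hswap hmin ⊢
          have hmcl2 : si < l.length := hlen
          have hui : UpInv (pvSwap l pi si) pi := by
            constructor
            · intro k hk hkl hkpi
              rw [pvSwap_length] at hkl
              rw [getD_pvSwap l pi si _ hpil hmcl2, getD_pvSwap l pi si k hpil hmcl2]
              by_cases hk1 : k = si
              · rw [hk1]
                rw [show (si - 1) / 2 = pi from by omega]
                rw [if_neg (by omega : ¬ pi = si), if_pos rfl, if_pos rfl]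
                omega
              · by_cases hk2 : (k - 1) / 2 = si
                · rw [hk2, if_pos rfl, if_neg hk1, if_neg hkpi]
                  have h2 := hinv.2 (by omega) k hkl hk2
                  rwa [show (si - 1) / 2 = pi from by omega] at h2
                · by_cases hk3 : (k - 1) / 2 = pi
                  · rw [if_neg hk2, if_pos hk3, if_neg hk1, if_neg hkpi]
                    exact hmin k (by omega) hkl
                  · rw [if_neg hk2, if_neg hk3, if_neg hk1, if_neg hkpi]
                    exact hinv.1 k hk hkl hk1
            · intro hpz c hcl hcp
              rw [pvSwap_length] at hcl
              rw [getD_pvSwap l pi si _ hpil hmcl2, getD_pvSwap l pi si c hpil hmcl2]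
              rw [if_neg (by omega : ¬ (pi - 1) / 2 = si), if_neg (by omega : ¬ (pi - 1) / 2 = pi)]
              by_cases hcs : c = si
              · subst hcs
                rw [if_pos rfl]
                exact hinv.1 pi hpz hpil (by omega)
              · rw [if_neg hcs, if_neg (by omega : ¬ c = pi)]
                have h1 := hinv.1 c (by omega) hcl hcs
                rw [show (c - 1) / 2 = pi from hcp] at h1
                exact le_trans (hinv.1 pi hpz hpil (by omega)) h1
          obtain ⟨hH, hP⟩ := IH pi (pvSwap l pi si) (by omega) (by rw [pvSwap_length]; omega) hui
          exact ⟨hH, hP.trans (pvSwap_perm l pi si hpil hmcl2)⟩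
        · -- no swap
          have hle : l.getD pi 0 ≤ l.getD mci 0 := not_lt.mp hswap
          have hui : UpInv l pi := by
            constructor
            · intro k hk hkl hkpi
              by_cases hk1 : k = si
              · rw [hk1]
                rw [show (si - 1) / 2 = pi from by omega]
                exact le_trans hle (hmin si hchild hlen)
              · exact hinv.1 k hk hkl hk1
            · intro hpz c hcl hcp
              have h2 := hinv.1 pi hpz hpil (by omega)
              have h3 : l.getD mci 0 ≤ l.getD c 0 := hmin c (by omega) hcl
              exact le_trans h2 (le_trans hle h3)
          exact IH pi l (by omega) hpil hui

theorem down_correct (fuel : Nat) : ∀ (l : List Int) (pi : Nat), l.length ≤ fuel + pi →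
    DownInv l pi → IsHeap (pvHeapifyDown fuel l pi) ∧ (pvHeapifyDown fuel l pi).Perm l := by
  induction fuel with
  | zero =>
    intro l pi hf hinv
    simp only [pvHeapifyDown]
    refine ⟨?_, List.Perm.refl l⟩
    intro k hk hkl
    by_cases hp : (k - 1) / 2 = pi
    · exfalso; omega
    · exact hinv.1 k hk hkl hp
  | succ n ih =>
  intro l pi hf hinv
  simp only [pvHeapifyDown]
  split
  · next heq =>
    refine ⟨?_, List.Perm.refl l⟩
    intro k hk hkl
    by_cases hp : (k - 1) / 2 = pi
    · exfalso
      have := minChild_none l pi heq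
      omega
    · exact hinv.1 k hk hkl hp
  · next mci heq =>
    obtain ⟨hmc, hmcl, hmin⟩ := minChild_spec l pi mci heq
    have hpim : pi < mci := by omega
    have hpil : pi < l.length := by omega
    split_ifs with hswap
    · have hdi : DownInv (pvSwap l pi mci) mci := by
          constructor
          · intro k hk hkl hkm
            rw [pvSwap_length] at hkl
            rw [getD_pvSwap l pi mci _ hpil hmcl, getD_pvSwap l pi mci k hpil hmcl]
            by_cases hk1 : k = mci
            · rw [hk1]
              rw [show (mci - 1) / 2 = pi from by omega]
              rw [if_neg (by omega : ¬ pi = mci), if_pos rfl, if_pos rfl]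
              omega
            · by_cases hk2 : k = pi
              · rw [hk2]
                rw [if_neg (by omega : ¬ (pi - 1) / 2 = mci),
                  if_neg (by omega : ¬ (pi - 1) / 2 = pi),
                  if_neg (by omega : ¬ pi = mci), if_pos rfl]
                exact hinv.2 (hk2 ▸ hk) mci hmcl (by omega)
              · by_cases hk3 : (k - 1) / 2 = pi
                · rw [if_neg hkm, if_pos hk3, if_neg hk1, if_neg hk2]
                  exact hmin k (by omega) hkl
                · rw [if_neg hkm, if_neg hk3, if_neg hk1, if_neg hk2]
                  exact hinv.1 k hk hkl hk3
          · intro h0 c hcl hcp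
            rw [pvSwap_length] at hcl
            rw [getD_pvSwap l pi mci _ hpil hmcl, getD_pvSwap l pi mci c hpil hmcl]
            rw [show (mci - 1) / 2 = pi from by omega]
            rw [if_neg (by omega : ¬ pi = mci), if_pos rfl,
              if_neg (by omega : ¬ c = mci), if_neg (by omega : ¬ c = pi)]
            have h1 := hinv.1 c (by omega) hcl (by omega)
            rw [show (c - 1) / 2 = mci from hcp] at h1
            exact h1
      obtain ⟨hH, hP⟩ := ih (pvSwap l pi mci) mci (by rw [pvSwap_length]; omega) hdi
      exact ⟨hH, hP.trans (pvSwap_perm l pi mci hpil hmcl)⟩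
    · have hle : l.getD pi 0 ≤ l.getD mci 0 := not_lt.mp hswap
      have hdi : DownInv l mci := by
          constructor
          · intro k hk hkl hkm
            by_cases hk3 : (k - 1) / 2 = pi
            · rw [hk3]
              exact le_trans hle (hmin k (by omega) hkl)
            · exact hinv.1 k hk hkl hk3
          · intro h0 c hcl hcp
            rw [show (mci - 1) / 2 = pi from by omega]
            have h1 := hinv.1 c (by omega) hcl (by omega)
            rw [show (c - 1) / 2 = mci from hcp] at h1
            exact le_trans hle h1
      exact ih l mci (by omega) hdi

theorem insert_correct (l : List Int) (x : Int) (h : IsHeap l) :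
    IsHeap (pvInsert l x) ∧ (pvInsert l x).Perm (x :: l) := by
  unfold pvInsert
  have e : (l ++ [x]).length - 1 = l.length := by simp
  rw [e]
  have hui : UpInv (l ++ [x]) l.length := by
    constructor
    · intro k hk hkl hkne
      have hkl2 : k < l.length := by simp at hkl; omega
      rw [getD_append_lt l x k hkl2, getD_append_lt l x _ (by omega)]
      exact h k hk hkl2
    · intro hj c hcl hcp
      exfalso
      simp at hcl
      omega
  obtain ⟨h1, h2⟩ := up_correct (l ++ [x]).length l.length (l ++ [x]) (by simp) (by simp) hui
  exact ⟨h1, h2.trans (List.perm_append_singleton x l)⟩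

theorem foldl_insert_gen (arr : List Int) : ∀ l0, IsHeap l0 →
    IsHeap (arr.foldl pvInsert l0) ∧ (arr.foldl pvInsert l0).Perm (arr ++ l0) := by
  induction arr with
  | nil => intro l0 h; exact ⟨h, by simp⟩
  | cons a t ih =>
    intro l0 h
    obtain ⟨hh, hp⟩ := insert_correct l0 a h
    obtain ⟨hh2, hp2⟩ := ih (pvInsert l0 a) hh
    refine ⟨by simpa using hh2, ?_⟩
    simp only [List.foldl_cons]
    exact hp2.trans ((hp.append_left t).trans List.perm_middle)

theorem foldl_insert_correct (arr : List Int) :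
    IsHeap (arr.foldl pvInsert []) ∧ (arr.foldl pvInsert []).Perm arr := by
  obtain ⟨h1, h2⟩ := foldl_insert_gen arr [] (by intro k hk hkl; simp at hkl)
  exact ⟨h1, by simpa using h2⟩

theorem root_min (l : List Int) (h : IsHeap l) : ∀ k, k < l.length → l.getD 0 0 ≤ l.getD k 0 := by
  intro k
  induction k using Nat.strong_induction_on with
  | _ k ih =>
    intro hk
    rcases Nat.eq_zero_or_pos k with h0 | h0
    · subst h0; exact le_refl _
    · exact le_trans (ih ((k - 1) / 2) (by omega) (by omega)) (h k h0 hk)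

theorem root_min_mem (l : List Int) (h : IsHeap l) : ∀ y ∈ l, l.getD 0 0 ≤ y := by
  intro y hy
  obtain ⟨k, hk, rfl⟩ := List.getElem_of_mem hy
  have := root_min l h k hk
  simpa [List.getD_eq_getElem?_getD, List.getElem?_eq_getElem hk] using this

theorem pop_correct (l : List Int) (h : IsHeap l) (hne : l ≠ []) :
    ∃ l', pvPop l = some (l.getD 0 0, l') ∧ IsHeap l' ∧ (l.getD 0 0 :: l').Perm l := by
  have hn : 0 < l.length := List.length_pos_iff.mpr hne
  have hpop : pvPop l = some (l.getD 0 0,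
      pvHeapifyDown ((pvSwap l 0 (l.length - 1)).dropLast).length
        ((pvSwap l 0 (l.length - 1)).dropLast) 0) := by
    unfold pvPop
    rw [if_neg (by simpa [List.isEmpty_iff] using hne)]
  have hdl : ((pvSwap l 0 (l.length - 1)).dropLast).length = l.length - 1 := by simp
  have hdi : DownInv ((pvSwap l 0 (l.length - 1)).dropLast) 0 := by
    constructor
    · intro k hk hkl hkp
      rw [hdl] at hkl
      rw [getD_dropLast _ k (by simp only [pvSwap_length]; omega),
        getD_dropLast _ ((k - 1) / 2) (by simp only [pvSwap_length]; omega)]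
      rw [getD_pvSwap l 0 (l.length - 1) k (by omega) (by omega),
        getD_pvSwap l 0 (l.length - 1) _ (by omega) (by omega)]
      rw [if_neg (by omega : ¬ k = l.length - 1), if_neg (by omega : ¬ k = 0),
        if_neg (by omega : ¬ (k - 1) / 2 = l.length - 1), if_neg hkp]
      exact h k hk (by omega)
    · intro h0
      exact absurd h0 (lt_irrefl 0)
  obtain ⟨hh, hp⟩ := down_correct ((pvSwap l 0 (l.length - 1)).dropLast).length
    ((pvSwap l 0 (l.length - 1)).dropLast) 0 (by omega) hdi
  refine ⟨_, hpop, hh, ?_⟩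
  have hswp : (pvSwap l 0 (l.length - 1)).Perm l := pvSwap_perm l 0 (l.length - 1) (by omega) (by omega)
  have hne2 : pvSwap l 0 (l.length - 1) ≠ [] := by
    intro he
    have h0 := pvSwap_length l 0 (l.length - 1)
    rw [he] at h0
    simp at h0
    omega
  have hlast : pvSwap l 0 (l.length - 1) = (pvSwap l 0 (l.length - 1)).dropLast ++ [l.getD 0 0] := by
    conv_lhs => rw [← List.dropLast_append_getLast hne2]
    congr 1
    have hgl : (pvSwap l 0 (l.length - 1)).getLast hne2
        = (pvSwap l 0 (l.length - 1)).getD ((pvSwap l 0 (l.length - 1)).length - 1) 0 := by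
      rw [List.getLast_eq_getElem, List.getD_eq_getElem?_getD,
        List.getElem?_eq_getElem (by simp; omega)]
      rfl
    rw [hgl]
    simp only [pvSwap_length]
    rw [getD_pvSwap l 0 (l.length - 1) _ (by omega) (by omega), if_pos rfl]
  have h1 : (l.getD 0 0 :: pvHeapifyDown ((pvSwap l 0 (l.length - 1)).dropLast).length
        ((pvSwap l 0 (l.length - 1)).dropLast) 0).Perm
      (l.getD 0 0 :: (pvSwap l 0 (l.length - 1)).dropLast) := hp.cons _
  have h2 : (l.getD 0 0 :: (pvSwap l 0 (l.length - 1)).dropLast).Perm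
      ((pvSwap l 0 (l.length - 1)).dropLast ++ [l.getD 0 0]) :=
    (List.perm_append_singleton _ _).symm
  exact h1.trans (h2.trans (hlast ▸ hswp))

theorem pvPop_eq_none (l : List Int) (h : pvPop l = none) : l = [] := by
  cases l with
  | nil => rfl
  | cons a t => simp [pvPop] at h

-- the extraction sequence of the pop loop (fuel ≥ length suffices)
def pvExtract : Nat → List Int → List Int
  | 0, _ => []
  | fuel + 1, l =>
    match pvPop l with
    | none => []
    | some (x, l') => x :: pvExtract fuel l'

theorem pvPop_length (l : List Int) (x : Int) (l' : List Int)
    (h : pvPop l = some (x, l')) : l'.length + 1 = l.length := by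
  unfold pvPop at h
  rcases l with _ | ⟨a, t⟩
  · simp at h
  · simp only [List.isEmpty_cons, Bool.false_eq_true, if_false, Option.some.injEq,
      Prod.mk.injEq] at h
    obtain ⟨-, h2⟩ := h
    subst h2
    simp [pvHeapifyDown_length]

theorem extract_nil (fuel : Nat) : pvExtract fuel [] = [] := by
  cases fuel with
  | zero => rfl
  | succ n => simp [pvExtract, pvPop]

theorem extract_eq_cons (n : Nat) (l : List Int) (x : Int) (l' : List Int)
    (h : pvPop l = some (x, l')) : pvExtract (n + 1) l = x :: pvExtract n l' := by
  simp [pvExtract, h]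

-- A's pop loop as plain two-at-a-time recursion over the extraction sequence
def pairRec : List Int → Int → Int → Int
  | [], n1, n2 => n1 + n2
  | [x], n1, n2 => (n1 * 10 + x) + n2
  | x :: y :: r, n1, n2 => pairRec r (n1 * 10 + x) (n2 * 10 + y)

theorem extract_correct_gen : ∀ (fuel : Nat) (l : List Int), l.length ≤ fuel → IsHeap l →
    (pvExtract fuel l).Perm l ∧ (pvExtract fuel l).Pairwise (· ≤ ·) := by
  intro fuel
  induction fuel with
  | zero =>
    intro l hl _
    have : l = [] := List.length_eq_zero_iff.mp (Nat.le_zero.mp hl)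
    subst this
    simp [extract_nil]
  | succ n ih =>
    intro l hl h
    by_cases hne : l = []
    · subst hne; simp [extract_nil]
    · obtain ⟨l', hpop, hh', hperm⟩ := pop_correct l h hne
      have hlen := pvPop_length l _ _ hpop
      rw [extract_eq_cons n l _ l' hpop]
      obtain ⟨ihp, ihs⟩ := ih l' (by omega) hh'
      refine ⟨(ihp.cons _).trans hperm, ?_⟩
      rw [List.pairwise_cons]
      refine ⟨?_, ihs⟩
      intro y hy
      exact root_min_mem l h y (hperm.subset (List.mem_cons_of_mem _ (ihp.subset hy)))

theorem extract_correct (l : List Int) (h : IsHeap l) :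
    (pvExtract l.length l).Perm l ∧ (pvExtract l.length l).Pairwise (· ≤ ·) :=
  extract_correct_gen l.length l le_rfl h

theorem loop_eq_pairRec_gen : ∀ (fuel : Nat) (l : List Int), l.length ≤ fuel → IsHeap l →
    ∀ (n1 n2 : Int), pvLoop fuel l n1 n2 = pairRec (pvExtract l.length l) n1 n2 := by
  intro fuel
  induction fuel with
  | zero =>
    intro l hl _ n1 n2
    have : l = [] := List.length_eq_zero_iff.mp (Nat.le_zero.mp hl)
    subst this
    rfl
  | succ n ih =>
    intro l hl h n1 n2
    simp only [pvLoop]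
    by_cases hne : l = []
    · subst hne
      simp [pvPop, extract_nil, pairRec]
    · obtain ⟨l1, hpop, hh1, hperm1⟩ := pop_correct l h hne
      have hlen1 := pvPop_length l _ _ hpop
      split
      · next heq => rw [hpop] at heq; simp at heq
      · next x l1' heq =>
        rw [hpop] at heq
        simp at heq
        obtain ⟨rfl, rfl⟩ := heq
        rw [show l.length = l1.length + 1 from by omega,
          extract_eq_cons l1.length l _ l1 hpop]
        split
        · next heq2 =>
          rw [pvPop_eq_none _ heq2, extract_nil]
          rfl
        · next y l2 heq2 =>
          have hne1 : l1 ≠ [] := by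
            intro he
            subst he
            simp [pvPop] at heq2
          obtain ⟨l2', hpop2, hh2, hperm2⟩ := pop_correct l1 hh1 hne1
          have hlen2 := pvPop_length l1 _ _ hpop2
          rw [hpop2] at heq2
          simp at heq2
          obtain ⟨rfl, rfl⟩ := heq2
          rw [show l1.length = l2'.length + 1 from by omega,
            extract_eq_cons l2'.length l1 _ l2' hpop2]
          exact ih l2' (by omega) hh2 _ _

theorem loop_eq_pairRec (l : List Int) (h : IsHeap l) (n1 n2 : Int) :
    pvLoop l.length l n1 n2 = pairRec (pvExtract l.length l) n1 n2 :=
  loop_eq_pairRec_gen l.length l le_rfl h _ _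

theorem foldB_gen : ∀ (n : Nat) (xs : List Int), xs.length ≤ n →
    ∀ (k n1 n2 : Int), PySem.Int.mod k 2 = 0 →
    (((PySem.List.enumerate xs k).foldl
      (fun (acc : Int × Int) iv =>
        if PySem.Int.mod iv.1 2 = 0 then (acc.1 * 10 + iv.2, acc.2)
        else (acc.1, acc.2 * 10 + iv.2)) (n1, n2)).1 +
     ((PySem.List.enumerate xs k).foldl
      (fun (acc : Int × Int) iv =>
        if PySem.Int.mod iv.1 2 = 0 then (acc.1 * 10 + iv.2, acc.2)
        else (acc.1, acc.2 * 10 + iv.2)) (n1, n2)).2) = pairRec xs n1 n2 := by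
  intro n
  induction n with
  | zero =>
    intro xs hl k n1 n2 hk
    have : xs = [] := List.length_eq_zero_iff.mp (Nat.le_zero.mp hl)
    subst this
    simp [PySem.List.enumerate, pairRec]
  | succ n ih =>
    intro xs hl k n1 n2 hk
    match xs with
    | [] => simp [PySem.List.enumerate, pairRec]
    | [x] =>
      simp only [PySem.List.enumerate_cons, PySem.List.enumerate_nil, List.foldl_cons,
        List.foldl_nil, if_pos hk]
      rfl
    | x :: y :: r =>
      have hk1 : ¬ PySem.Int.mod (k + 1) 2 = 0 := by
        simp only [PySem.Int.mod, Int.fmod_eq_emod] at *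
        omega
      have hk2 : PySem.Int.mod (k + 1 + 1) 2 = 0 := by
        simp only [PySem.Int.mod, Int.fmod_eq_emod] at *
        omega
      simp only [PySem.List.enumerate_cons, List.foldl_cons, if_pos hk, if_neg hk1]
      have hr : r.length ≤ n := by simp at hl; omega
      exact ih r hr (k + 1 + 1) (n1 * 10 + x) (n2 * 10 + y) hk2

theorem foldB (xs : List Int) (k n1 n2 : Int) (hk : PySem.Int.mod k 2 = 0) :
    (((PySem.List.enumerate xs k).foldl
      (fun (acc : Int × Int) iv =>
        if PySem.Int.mod iv.1 2 = 0 then (acc.1 * 10 + iv.2, acc.2)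
        else (acc.1, acc.2 * 10 + iv.2)) (n1, n2)).1 +
     ((PySem.List.enumerate xs k).foldl
      (fun (acc : Int × Int) iv =>
        if PySem.Int.mod iv.1 2 = 0 then (acc.1 * 10 + iv.2, acc.2)
        else (acc.1, acc.2 * 10 + iv.2)) (n1, n2)).2) = pairRec xs n1 n2 :=
  foldB_gen xs.length xs le_rfl k n1 n2 hk

-- ===== VERDICT (by name: the statement is the Claim_ definition above) =====
theorem get_min_sum_spec : Claim_equal_get_min_sum := by
  intro arr _
  unfold Spec_get_min_sum get_min_sum get_min_sum_alt
  obtain ⟨hheap, hperm⟩ := foldl_insert_correct arr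
  obtain ⟨hperm2, hpair⟩ := extract_correct _ hheap
  have hsorted : (PySem.List.sorted arr (fun x => x))
      = pvExtract (arr.foldl pvInsert []).length (arr.foldl pvInsert []) :=
    PySem.List.sorted_id_eq_of_perm_of_pairwise arr _ (hperm2.trans hperm) hpair
  rw [loop_eq_pairRec _ hheap]
  simp only [hsorted]
  rw [← foldB _ 0 0 0 (by simp [PySem.Int.mod])]
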